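-- pv_equiv track=rewrite | github.com/AbdighaniMD/Data-Structures-and-Algorithms-python-50-Days | 01-Day/monotonic.py | monotone_increasing
-- ===== SOURCE A (Python) =====
-- def monotone_increasing(nums):
--     left = 0
--     right = 1
--     while right < len(nums):
--         if nums[left] > nums[right]:
--             return False
--         else:
--             left+=1
--             right+=1
--     return True
-- ===== SOURCE B (Python) =====
-- def monotone_increasing(nums):
--     return nums == sorted(nums)
-- ===== Notes on version B (the rewrite author's own statement) =====
-- stated objective: simpler
-- what changed: Replaces A's two-pointer adjacent-pair scan with comparing the list against its sorted copy (nums == sorted(nums)).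
import Mathlib
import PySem

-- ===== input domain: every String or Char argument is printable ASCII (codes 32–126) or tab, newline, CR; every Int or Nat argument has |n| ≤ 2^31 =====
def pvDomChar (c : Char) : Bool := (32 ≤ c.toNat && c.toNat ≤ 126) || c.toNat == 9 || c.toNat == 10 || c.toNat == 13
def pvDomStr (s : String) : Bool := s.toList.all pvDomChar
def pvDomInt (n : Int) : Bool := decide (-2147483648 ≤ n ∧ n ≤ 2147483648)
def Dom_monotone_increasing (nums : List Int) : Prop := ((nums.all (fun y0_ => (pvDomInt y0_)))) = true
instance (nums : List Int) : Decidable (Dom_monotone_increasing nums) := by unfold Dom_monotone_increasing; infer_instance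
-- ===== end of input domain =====

-- ===== PORT A =====
-- while right < len(nums): compare nums[left] > nums[right], else advance both pointers
def monotone_increasing.go (nums : List Int) (left right : Nat) : Bool :=
  if _h : right < nums.length then
    if nums.getD left 0 > nums.getD right 0 then false
    else monotone_increasing.go nums (left + 1) (right + 1)
  else true
termination_by nums.length - right

def monotone_increasing (nums : List Int) : Bool :=
  monotone_increasing.go nums 0 1

-- ===== PORT B =====
-- return nums == sorted(nums)
def monotone_increasing_alt (nums : List Int) : Bool :=
  decide (nums = PySem.List.sorted nums (fun x => x) false)

-- ===== PRECONDITION & SPEC =====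
def Spec_monotone_increasing (nums : List Int) (out : Bool) : Prop := out = monotone_increasing_alt nums
instance (nums : List Int) (out : Bool) : Decidable (Spec_monotone_increasing nums out) := by unfold Spec_monotone_increasing; infer_instance

-- ===== CLAIM (what is proved, stated in full; the proofs are below) =====
def Claim_equal_monotone_increasing : Prop := ∀ (nums : List Int), Dom_monotone_increasing nums → Spec_monotone_increasing nums (monotone_increasing nums)

-- ===== LEMMAS AND PROOFS =====

-- A's scan from position l equals the adjacent-chain condition on the suffix starting at l
theorem go_eq_chain (nums : List Int) (l : Nat) :
    monotone_increasing.go nums l (l + 1) = decide ((nums.drop l).IsChain (· ≤ ·)) := by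
  induction hn : nums.length - (l + 1) generalizing l with
  | zero =>
    rw [monotone_increasing.go]
    have h : ¬ l + 1 < nums.length := by omega
    simp only [dif_neg h]
    rcases Nat.lt_or_ge l nums.length with hl | hl
    · have h1 : nums.drop (l + 1) = [] := List.drop_eq_nil_of_le (by omega)
      have h2 : nums.drop l = [nums[l]] := by
        rw [List.drop_eq_getElem_cons hl, h1]
      simp [h2]
    · simp [List.drop_eq_nil_of_le hl]
  | succ n ih =>
    rw [monotone_increasing.go]
    have h : l + 1 < nums.length := by omega
    have hl : l < nums.length := by omega
    simp only [dif_pos h]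
    have hdl : nums.drop l = nums[l] :: nums.drop (l + 1) :=
      List.drop_eq_getElem_cons hl
    have hdl1 : nums.drop (l + 1) = nums[l + 1] :: nums.drop (l + 2) :=
      List.drop_eq_getElem_cons h
    have hgl : nums.getD l 0 = nums[l] := List.getD_eq_getElem _ _ hl
    have hgl1 : nums.getD (l + 1) 0 = nums[l + 1] := List.getD_eq_getElem _ _ h
    by_cases hc : nums.getD l 0 > nums.getD (l + 1) 0
    · rw [if_pos hc]
      have hab : ¬ nums[l] ≤ nums[l + 1] := by rw [hgl, hgl1] at hc; omega
      simp only [Bool.false_eq, decide_eq_false_iff_not]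
      rw [hdl, hdl1, List.isChain_cons_cons]
      exact fun hch => hab hch.1
    · rw [if_neg hc, ih (l + 1) (by omega)]
      have hab : nums[l] ≤ nums[l + 1] := by rw [hgl, hgl1] at hc; omega
      simp only [decide_eq_decide]
      rw [hdl, hdl1, List.isChain_cons_cons]
      simp [hab]

-- B's test equals the same chain condition
theorem alt_eq_chain (nums : List Int) :
    monotone_increasing_alt nums = decide (nums.IsChain (· ≤ ·)) := by
  unfold monotone_increasing_alt
  congr 1
  simp only [eq_iff_iff]
  constructor
  · intro hEq
    have hp := PySem.List.sorted_pairwise nums (fun x => x)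
    rw [← hEq] at hp
    exact List.isChain_iff_pairwise.mpr hp
  · intro hc
    have hc' : List.Pairwise (fun a b : Int => a ≤ b) nums := List.isChain_iff_pairwise.mp hc
    exact (PySem.List.sorted_eq_self_of_pairwise nums (fun x => x) hc').symm

-- ===== VERDICT (by name: the statement is the Claim_ definition above) =====
theorem monotone_increasing_spec : Claim_equal_monotone_increasing := by
  intro nums _
  unfold Spec_monotone_increasing monotone_increasing
  rw [go_eq_chain, alt_eq_chain]
  simp
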